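-- pv_equiv track=rewrite | github.com/lokesh1199/interview-prep | array/003.py | kMax
-- ===== SOURCE A (Python) =====
-- def kMax(a: list, k: int):
--     b = a[:]
--     for i in range(k):
--         max = i
--         for j in range(i+1, len(b)):
--             max = j if b[max] < b[j] else max
--         b[i], b[max] = b[max], b[i]
--     return b[k-1]
-- ===== SOURCE B (Python) =====
-- def kMax(a: list, k: int):
--     return sorted(a)[-k]
-- ===== Notes on version B (the rewrite author's own statement) =====
-- stated objective: faster
-- what changed: Replaces A's k passes of selection (each scanning the remaining suffix for its maximum and swapping it into place) by one library sort of the whole list followed by a single negative-index lookup sorted(a)[-k].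
-- outside the precondition, e.g. on kMax([1, 2], 0): A returns 2, B returns 1
import Mathlib
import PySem

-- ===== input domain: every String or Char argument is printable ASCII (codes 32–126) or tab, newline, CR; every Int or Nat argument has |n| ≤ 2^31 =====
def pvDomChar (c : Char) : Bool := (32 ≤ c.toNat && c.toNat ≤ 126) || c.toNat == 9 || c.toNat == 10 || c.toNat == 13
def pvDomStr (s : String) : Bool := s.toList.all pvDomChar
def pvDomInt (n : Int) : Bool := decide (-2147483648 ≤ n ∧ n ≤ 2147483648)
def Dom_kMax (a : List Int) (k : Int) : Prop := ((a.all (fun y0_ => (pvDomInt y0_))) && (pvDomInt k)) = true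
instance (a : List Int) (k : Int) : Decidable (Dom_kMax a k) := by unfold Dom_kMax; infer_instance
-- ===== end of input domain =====

-- B replaces A's k selection passes by one library sort plus a negative-index lookup (measurably faster).

-- ===== PORT A =====
-- inner loop: max = i; for j in range(i+1, len(b)): max = j if b[max] < b[j] else max
def kMaxInner (b : List Int) (i : Int) : Int :=
  (PySem.List.pyRange (i + 1) (b.length : Int) 1).foldl
    (fun mx j => if PySem.List.pyGetD b mx 0 < PySem.List.pyGetD b j 0 then j else mx) i

-- one pass of the outer loop: find max index, then b[i], b[max] = b[max], b[i]
def kMaxStep (b : List Int) (i : Int) : List Int :=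
  let m := kMaxInner b i
  let bm := PySem.List.pyGetD b m 0
  let bi := PySem.List.pyGetD b i 0
  PySem.List.pySetD (PySem.List.pySetD b i bm) m bi

def kMax (a : List Int) (k : Int) : Int :=
  let b := (PySem.List.pyRange 0 k 1).foldl kMaxStep a
  PySem.List.pyGetD b (k - 1) 0

-- ===== PORT B =====
def kMax_alt (a : List Int) (k : Int) : Int :=
  PySem.List.pyGetD (PySem.List.sorted a (fun x => x) false) (-k) 0

-- ===== PRECONDITION & SPEC =====
-- Pre_ restricts to the task's natural domain 1 ≤ k ≤ len(a): outside it A raises IndexError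
-- (empty list, k > len(a), or k ≤ -len(a)), except for negative counts 1-len(a) ≤ k ≤ 0 where
-- A returns the untouched original element a[k-1] — not a k-th largest — which B does not mimic.
def Pre_kMax (a : List Int) (k : Int) : Prop := a ≠ [] ∧ 1 ≤ k ∧ k ≤ (a.length : Int)
instance (a : List Int) (k : Int) : Decidable (Pre_kMax a k) := by unfold Pre_kMax; infer_instance

def pvWitness_kMax : List Int × Int := ([3, 1, 4, 1, 5], 3)

def Spec_kMax (a : List Int) (k : Int) (out : Int) : Prop := out = kMax_alt a k
instance (a : List Int) (k : Int) (out : Int) : Decidable (Spec_kMax a k out) := by unfold Spec_kMax; infer_instance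

-- ===== CLAIM (what is proved, stated in full; the proofs are below) =====
def Claim_equal_kMax : Prop := ∀ (a : List Int) (k : Int), Dom_kMax a k → Pre_kMax a k → Spec_kMax a k (kMax a k)

-- ===== LEMMAS AND PROOFS =====

-- the inner fold returns an index among {mx} ∪ l whose value dominates mx's and every index in l
theorem kMax_argmax_fold (b : List Int) (l : List Int) (mx : Int) :
    (l.foldl (fun m j => if PySem.List.pyGetD b m 0 < PySem.List.pyGetD b j 0 then j else m) mx = mx
      ∨ l.foldl (fun m j => if PySem.List.pyGetD b m 0 < PySem.List.pyGetD b j 0 then j else m) mx ∈ l)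
    ∧ PySem.List.pyGetD b mx 0 ≤
        PySem.List.pyGetD b (l.foldl (fun m j => if PySem.List.pyGetD b m 0 < PySem.List.pyGetD b j 0 then j else m) mx) 0
    ∧ ∀ j ∈ l, PySem.List.pyGetD b j 0 ≤
        PySem.List.pyGetD b (l.foldl (fun m j => if PySem.List.pyGetD b m 0 < PySem.List.pyGetD b j 0 then j else m) mx) 0 := by
  induction l generalizing mx with
  | nil => simp
  | cons x t ih =>
    simp only [List.foldl_cons]
    by_cases h : PySem.List.pyGetD b mx 0 < PySem.List.pyGetD b x 0
    · simp only [if_pos h]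
      obtain ⟨h1, h2, h3⟩ := ih x
      refine ⟨?_, le_trans (le_of_lt h) h2, ?_⟩
      · rcases h1 with h1 | h1
        · right; simp [h1]
        · right; simp [h1]
      · intro j hj
        rcases List.mem_cons.mp hj with rfl | hj
        · exact h2
        · exact h3 j hj
    · simp only [if_neg h]
      obtain ⟨h1, h2, h3⟩ := ih mx
      refine ⟨?_, h2, ?_⟩
      · rcases h1 with h1 | h1
        · left; exact h1
        · right; exact List.mem_cons_of_mem _ h1
      · intro j hj
        rcases List.mem_cons.mp hj with rfl | hj
        · exact le_trans (le_of_not_gt h) h2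
        · exact h3 j hj

-- value lookup in P ++ r at offset P.length + q
theorem kMax_getD_suffix (P r : List Int) (q : Nat) (hq : q < r.length) :
    PySem.List.pyGetD (P ++ r) ((P.length : Int) + (q : Int)) 0 = r[q] := by
  have : ((P.length : Int) + (q : Int)) = ((P.length + q : Nat) : Int) := by omega
  rw [this, PySem.List.pyGetD_natCast]
  rw [List.getD_eq_getElem?_getD, List.getElem?_append_right (by omega)]
  simp [hq]

-- one pass of A on P ++ r (r nonempty) keeps P, permutes r, and puts a maximum of r first
theorem kMax_step_lemma (P r : List Int) (hr : r ≠ []) :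
    ∃ m tl, kMaxStep (P ++ r) (P.length : Int) = P ++ m :: tl
      ∧ (m :: tl).Perm r ∧ ∀ x ∈ r, x ≤ m := by
  obtain ⟨r0, rt, rfl⟩ := List.exists_cons_of_ne_nil hr
  set b := P ++ r0 :: rt with hb
  set p : Int := (P.length : Int) with hp
  have hblen : (b.length : Int) = p + (1 + rt.length : Nat) := by simp [hb, hp]; ring
  -- characterize the argmax index
  have hfold := kMax_argmax_fold b (PySem.List.pyRange (p + 1) (b.length : Int) 1) p
  set m : Int := kMaxInner b p with hm
  have hm_fold : m = (PySem.List.pyRange (p + 1) (b.length : Int) 1).foldl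
      (fun mx j => if PySem.List.pyGetD b mx 0 < PySem.List.pyGetD b j 0 then j else mx) p := rfl
  have hmrange : p ≤ m ∧ m < (b.length : Int) := by
    rcases hfold.1 with h | h
    · rw [hm_fold] at *
      constructor
      · rw [h]
      · rw [h]; simp [hb]; omega
    · rw [hm_fold] at *
      have := (PySem.List.mem_pyRange_one).mp h
      omega
  have hp0 : (0:Int) ≤ p := by positivity
  -- q = m - p as a Nat
  have hqex : ∃ q : Nat, m = p + (q : Int) ∧ q < (r0 :: rt).length := by
    refine ⟨(m - p).toNat, ?_, ?_⟩
    · omega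
    · simp only [List.length_cons]
      omega
  obtain ⟨q, hq, hqlt⟩ := hqex
  have hbm : PySem.List.pyGetD b m 0 = (r0 :: rt)[q] := by
    rw [hq]; exact kMax_getD_suffix P (r0 :: rt) q hqlt
  have hbi : PySem.List.pyGetD b p 0 = r0 := by
    rw [hp, PySem.List.pyGetD_natCast, hb]
    rw [List.getD_eq_getElem?_getD, List.getElem?_append_right (le_refl _)]
    simp
  -- the dominance property, transported to elements of r
  have hdom : ∀ x ∈ r0 :: rt, x ≤ (r0 :: rt)[q] := by
    intro x hx
    obtain ⟨idx, hidx, rfl⟩ := List.getElem_of_mem hx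
    rcases Nat.eq_zero_or_pos idx with rfl | hpos
    · -- x = r0 = b[p]
      rw [← hbm, List.getElem_cons_zero, ← hbi]
      exact hfold.2.1
    · -- x = r[idx], idx ≥ 1: index p + idx ∈ pyRange (p+1) len
      rw [← hbm]
      have hx' : PySem.List.pyGetD b (p + (idx : Int)) 0 = (r0 :: rt)[idx] :=
        kMax_getD_suffix P (r0 :: rt) idx hidx
      rw [← hx']
      apply hfold.2.2
      rw [PySem.List.mem_pyRange_one]
      constructor
      · omega
      · rw [hblen]; simp at hidx ⊢; omega
  -- now compute the swap
  have hstep : kMaxStep b p = P ++ ((r0 :: rt).set 0 ((r0 :: rt)[q])).set q r0 := by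
    show PySem.List.pySetD (PySem.List.pySetD b p (PySem.List.pyGetD b m 0)) m (PySem.List.pyGetD b p 0)
        = P ++ ((r0 :: rt).set 0 ((r0 :: rt)[q])).set q r0
    rw [hbm, hbi]
    rw [PySem.List.pySetD_of_nonneg b _ hp0,
        PySem.List.pySetD_of_nonneg _ _ (by omega : (0:Int) ≤ m)]
    have h1 : p.toNat = P.length := by simp [hp]
    have h2 : m.toNat = P.length + q := by omega
    rw [h1, h2, hb,
        List.set_append_right P.length _ (le_refl _),
        List.set_append_right (P.length + q) r0 (by omega)]
    simp
  -- case split on q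
  rcases Nat.eq_zero_or_pos q with rfl | hqpos
  · refine ⟨r0, rt, ?_, List.Perm.refl _, ?_⟩
    · rw [hstep]; simp
    · intro x hx; simpa using hdom x hx
  · -- q = q' + 1 ≥ 1
    obtain ⟨q', rfl⟩ : ∃ q', q = q' + 1 := ⟨q - 1, by omega⟩
    have hq1 : q' < rt.length := by simp at hqlt; omega
    set rq := (r0 :: rt)[q' + 1] with hrq
    have hrq' : rt[q'] = rq := by rw [hrq]; simp
    refine ⟨rq, rt.set q' r0, ?_, ?_, fun x hx => hdom x hx⟩
    · rw [hstep, List.set_cons_zero, List.set_cons_succ]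
    · have hdecomp : rt = rt.take q' ++ rt[q'] :: rt.drop (q' + 1) := by
        conv_lhs => rw [← List.take_append_drop q' rt]
        congr 1
        exact (List.getElem_cons_drop hq1).symm
      have htl : (rt.take q').length = q' := by simp; omega
      have hset : rt.set q' r0 = rt.take q' ++ r0 :: rt.drop (q' + 1) := by
        conv_lhs => rw [hdecomp]
        rw [List.set_append_right q' r0 (by omega), htl, Nat.sub_self, List.set_cons_zero]
      rw [hset, ← hrq']
      conv_rhs => rw [hdecomp]
      exact (List.Perm.cons _ List.perm_middle).trans
        ((List.Perm.swap _ _ _).trans (List.Perm.cons _ List.perm_middle.symm))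

-- the outer loop invariant: after t passes the first t slots hold the t largest (descending), the rest permutes the remainder
theorem kMax_loop_invariant (a R : List Int) (hperm : R.Perm a)
    (hsort : R.Pairwise (fun x y => y ≤ x)) (t : Nat) (ht : t ≤ a.length) :
    ∃ r, (PySem.List.pyRange 0 (t : Int) 1).foldl kMaxStep a = R.take t ++ r
      ∧ r.Perm (R.drop t) := by
  induction t with
  | zero =>
    refine ⟨a, by simp, ?_⟩
    simpa using hperm.symm
  | succ t ih =>
    obtain ⟨r, hfold, hrperm⟩ := ih (by omega)
    have hRlen : R.length = a.length := hperm.length_eq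
    have htlt : t < R.length := by omega
    have hrne : r ≠ [] := by
      intro h
      have := hrperm.length_eq
      rw [h] at this
      simp [List.length_drop] at this
      omega
    have hsplit : (PySem.List.pyRange 0 ((t+1 : Nat) : Int) 1) =
        PySem.List.pyRange 0 (t : Int) 1 ++ [(t : Int)] := by
      push_cast
      exact PySem.List.pyRange_one_succ_right (by positivity)
    rw [hsplit, List.foldl_append, hfold]
    simp only [List.foldl_cons, List.foldl_nil]
    have hlenTake : (R.take t).length = t := by simp; omega
    obtain ⟨m, tl, hstep, hmperm, hmax⟩ := kMax_step_lemma (R.take t) r hrne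
    rw [hlenTake] at hstep
    rw [hstep]
    -- head m equals R[t]
    have hdropeq : R.drop t = R[t] :: R.drop (t+1) := (List.getElem_cons_drop htlt).symm
    have hRt_ge : ∀ x ∈ R.drop t, x ≤ R[t] := by
      have hpw : (R.drop t).Pairwise (fun x y => y ≤ x) := hsort.drop
      rw [hdropeq] at hpw
      intro x hx
      rw [hdropeq] at hx
      rcases List.mem_cons.mp hx with rfl | hx
      · exact le_refl _
      · exact (List.pairwise_cons.mp hpw).1 x hx
    have hmem_drop : ∀ x, x ∈ m :: tl ↔ x ∈ R.drop t := fun x =>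
      ⟨fun h => hrperm.mem_iff.mp (hmperm.mem_iff.mp h),
       fun h => hmperm.mem_iff.mpr (hrperm.mem_iff.mpr h)⟩
    have hmRt : m = R[t] := by
      have h1 : m ≤ R[t] := hRt_ge m ((hmem_drop m).mp (List.mem_cons_self))
      have h2 : R[t] ≤ m := by
        have : R[t] ∈ r := hrperm.mem_iff.mpr (by rw [hdropeq]; exact List.mem_cons_self)
        exact hmax _ this
      omega
    have hperm_cons : (m :: tl).Perm (R[t] :: R.drop (t+1)) := by
      rw [← hdropeq]; exact hmperm.trans hrperm
    refine ⟨tl, ?_, ?_⟩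
    · have htake : R.take (t+1) = R.take t ++ [R[t]] := List.take_succ_eq_append_getElem htlt
      rw [htake, hmRt, List.append_assoc]
      simp
    · rw [hmRt] at hperm_cons
      exact hperm_cons.cons_inv

-- ===== VERDICT (by name: the statement is the Claim_ definition above) =====
theorem kMax_spec : Claim_equal_kMax := by
  intro a k _ hpre
  obtain ⟨hne, hk1, hkle⟩ := hpre
  unfold Spec_kMax kMax kMax_alt
  set S := PySem.List.sorted a (fun x => x) false with hS
  have hSperm : S.Perm a := PySem.List.sorted_perm a (fun x => x) false
  have hSsort : S.Pairwise (fun x y => x ≤ y) := by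
    have := PySem.List.sorted_pairwise a (fun x => x)
    simpa using this
  have hSlen : S.length = a.length := hSperm.length_eq
  set R := S.reverse with hR
  have hRperm : R.Perm a := (List.reverse_perm S).trans hSperm
  have hRsort : R.Pairwise (fun x y => y ≤ x) := by
    rw [hR, List.pairwise_reverse]
    exact hSsort
  set kn := k.toNat with hkn
  have hk : k = (kn : Int) := by omega
  have hknle : kn ≤ a.length := by omega
  have hkn1 : 1 ≤ kn := by omega
  obtain ⟨r, hfold, _⟩ := kMax_loop_invariant a R hRperm hRsort kn hknle
  rw [hk, hfold]
  have hRlen : R.length = a.length := hRperm.length_eq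
  -- A's value: (R.take kn ++ r)[kn - 1] = R[kn-1]
  have hA : PySem.List.pyGetD (R.take kn ++ r) ((kn : Int) - 1) 0 = R[kn - 1]'(by omega) := by
    have hcast : ((kn : Int) - 1) = ((kn - 1 : Nat) : Int) := by omega
    rw [hcast, PySem.List.pyGetD_natCast, List.getD_eq_getElem?_getD,
        List.getElem?_append_left (by simp; omega)]
    have hlt : kn - 1 < (R.take kn).length := by simp; omega
    rw [List.getElem?_eq_getElem hlt]
    simp [List.getElem_take]
  rw [hA]
  -- B's value: S[-k] = S[n - kn]
  have hB : PySem.List.pyGetD S (-(kn : Int)) 0 = S[S.length - kn]'(by omega) := by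
    rw [PySem.List.pyGetD_neg_natCast _ _ _ (by omega) (by omega)]
  rw [hB]
  apply Option.some.inj
  rw [← List.getElem?_eq_getElem, ← List.getElem?_eq_getElem]
  show S.reverse[kn - 1]? = S[S.length - kn]?
  rw [List.getElem?_reverse (by omega)]
  congr 1
  omega
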